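-- pv_equiv track=rewrite | github.com/vlad-redL1ne/Coursera | coursera/python-basic-programming/week5/hw39.py | shift_array
-- ===== SOURCE A (Python) =====
-- def shift_array(items):
--     items = list(map(int, items.split()))
--
--     zero_index = 9223372036854775807
--
--     for i in range(0, len(items)):
--         if items[i] == 0:
--             if i < zero_index:
--                 zero_index = i
--
--         elif i > zero_index:
--             items[zero_index], items[i] = items[i], 0
--             zero_index += 1
--
--     return items
-- ===== SOURCE B (Python) =====
-- def shift_array(items):
--     nums = [int(t) for t in items.split()]
--     nonzero = [x for x in nums if x != 0]
--     return nonzero + [0] * (len(nums) - len(nonzero))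
-- ===== Notes on version B (the rewrite author's own statement) =====
-- stated objective: simpler
-- what changed: A partitions in place with a moving zero_index sentinel and element swaps; B just filters out the non-zeros in one comprehension and appends freshly generated zero padding, with no index or swap bookkeeping.
import Mathlib
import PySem

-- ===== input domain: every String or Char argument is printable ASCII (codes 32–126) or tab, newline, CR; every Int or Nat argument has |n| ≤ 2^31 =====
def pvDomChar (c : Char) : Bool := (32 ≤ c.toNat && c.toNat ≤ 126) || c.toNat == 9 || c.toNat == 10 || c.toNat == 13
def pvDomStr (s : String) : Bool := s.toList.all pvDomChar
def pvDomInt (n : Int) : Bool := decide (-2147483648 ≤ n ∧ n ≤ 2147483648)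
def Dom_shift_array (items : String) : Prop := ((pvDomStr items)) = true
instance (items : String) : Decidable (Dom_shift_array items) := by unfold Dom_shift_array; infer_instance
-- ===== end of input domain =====

-- B replaces A's in-place swap/zero-index partition loop by a single filter of the
-- non-zeros plus zero padding (objective: simpler).


-- ===== PORT A =====
-- the loop body of A: i is the range index, state = (items, zero_index);
-- items[i] is read with a default that is never used (i is always in range),
-- and the tuple swap 'items[zero_index], items[i] = items[i], 0' is two List.set
-- on the two distinct in-range positions zero_index < i.
def shiftStepA (st : List Int × Int) (i : Int) : List Int × Int :=
  if PySem.List.pyGetD st.1 i 0 = 0 then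
    if i < st.2 then (st.1, i) else st
  else if i > st.2 then
    ((st.1.set st.2.toNat (PySem.List.pyGetD st.1 i 0)).set i.toNat 0, st.2 + 1)
  else st

def shift_array (items : String) : List Int :=
  let nums : List Int := (PySem.Str.split₀ items).map (fun t => (PySem.Int.ofStr? t).getD 0)
  ((PySem.List.pyRange 0 (nums.length : Int) 1).foldl shiftStepA
    (nums, 9223372036854775807)).1

-- ===== PORT B =====
def shift_array_alt (items : String) : List Int :=
  let nums : List Int := (PySem.Str.split₀ items).map (fun t => (PySem.Int.ofStr? t).getD 0)
  let nonzero := nums.filter (fun x => x != 0)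
  nonzero ++ List.replicate (nums.length - nonzero.length) 0

-- ===== PRECONDITION & SPEC =====
-- Pre_ requires every whitespace-separated token to parse as a Python int (A raises
-- ValueError otherwise), and fewer than 2^63-1 tokens: beyond that A's int64-sized
-- zero_index sentinel would no longer exceed every index (and any real run of A raises
-- MemoryError long before such a list exists).
def Pre_shift_array (items : String) : Prop :=
  (∀ t ∈ PySem.Str.split₀ items, (PySem.Int.ofStr? t).isSome) ∧
  ((PySem.Str.split₀ items).length : Int) < 9223372036854775807
instance (items : String) : Decidable (Pre_shift_array items) := by unfold Pre_shift_array; infer_instance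
def pvWitness_shift_array : String := "1 0 2 0 3"

def Spec_shift_array (items : String) (out : List Int) : Prop := out = shift_array_alt items
instance (items : String) (out : List Int) : Decidable (Spec_shift_array items out) := by unfold Spec_shift_array; infer_instance

-- ===== CLAIM (what is proved, stated in full; the proofs are below) =====
def Claim_equal_shift_array : Prop := ∀ (items : String), Dom_shift_array items → Pre_shift_array items → Spec_shift_array items (shift_array items)

-- ===== LEMMAS AND PROOFS =====

-- Loop invariant of A's partition loop, by induction on the processed prefix: after the
-- first k steps the list is  (non-zeros of the first k) ++ zero padding ++ untouched tail,
-- and zero_index is the number of placed non-zeros once a zero has been seen.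
theorem shiftA_inv (nums : List Int) (hlen : (nums.length : Int) < 9223372036854775807)
    (k : Nat) (hk : k ≤ nums.length) :
    (PySem.List.pyRange 0 (k : Int) 1).foldl shiftStepA (nums, 9223372036854775807) =
      ((nums.take k).filter (fun x => x != 0) ++
         List.replicate (k - ((nums.take k).filter (fun x => x != 0)).length) 0 ++
         nums.drop k,
       if (0:Int) ∈ nums.take k then (((nums.take k).filter (fun x => x != 0)).length : Int)
       else 9223372036854775807) := by
  induction k with
  | zero => simp [PySem.List.pyRange_one_eq_nil]
  | succ k ih =>
    have hk' : k < nums.length := by omega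
    have hrange : PySem.List.pyRange 0 ((k+1 : Nat) : Int) 1 =
        PySem.List.pyRange 0 (k : Int) 1 ++ [(k : Int)] := by
      push_cast
      exact PySem.List.pyRange_one_succ_right (by positivity)
    rw [hrange, List.foldl_append, ih (by omega)]
    set nz := (nums.take k).filter (fun x => x != 0) with hnz
    have hm : nz.length ≤ k := by
      calc nz.length ≤ (nums.take k).length := List.length_filter_le _ _
        _ = k := by rw [List.length_take]; omega
    have hpre : (nz ++ List.replicate (k - nz.length) 0).length = k := by
      simp; omega
    have hdrop : nums.drop k = nums[k] :: nums.drop (k+1) := List.drop_eq_getElem_cons hk'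
    have hget : PySem.List.pyGetD
        (nz ++ List.replicate (k - nz.length) 0 ++ nums.drop k) ((k : Nat) : Int) 0 = nums[k] := by
      rw [PySem.List.pyGetD_natCast, List.getD_eq_getElem?_getD,
        List.getElem?_append_right (by rw [hpre]), hpre, Nat.sub_self, hdrop]
      rfl
    have htake : nums.take (k+1) = nums.take k ++ [nums[k]] := by
      rw [List.take_add_one, List.getElem?_eq_getElem hk']
      rfl
    simp only [List.foldl_cons, List.foldl_nil, shiftStepA, hget]
    by_cases h0 : nums[k] = 0
    · have hftk : (nums.take (k+1)).filter (fun x => x != 0) = nz := by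
        rw [htake, List.filter_append, ← hnz]
        simp [h0]
      have hmem' : (0:Int) ∈ nums.take (k+1) := by
        rw [htake]
        exact List.mem_append.mpr (Or.inr (by simp [h0]))
      by_cases hmem : (0:Int) ∈ nums.take k
      · -- a zero was already seen: nothing happens, the new zero joins the padding
        have hcond : ¬ ((k:Int) < (if (0:Int) ∈ nums.take k then (nz.length:Int)
            else 9223372036854775807)) := by
          rw [if_pos hmem]
          exact Int.not_lt.mpr (by exact_mod_cast hm)
        rw [if_pos h0, if_neg hcond]
        rw [hftk, if_pos hmem', if_pos hmem, Prod.mk.injEq]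
        refine ⟨?_, rfl⟩
        have hrep : List.replicate (k + 1 - nz.length) (0:Int) =
            List.replicate (k - nz.length) 0 ++ [0] := by
          rw [← List.replicate_succ']; congr 1; omega
        rw [hrep, hdrop, h0]
        simp [List.append_assoc]
      · -- first zero: zero_index := k, list unchanged
        have hall : nz = nums.take k := by
          rw [hnz, List.filter_eq_self]
          intro a ha
          simp only [bne_iff_ne, ne_eq]
          intro h; exact hmem (h ▸ ha)
        have hnzlen : nz.length = k := by rw [hall, List.length_take]; omega
        have hcond : ((k:Int) < (if (0:Int) ∈ nums.take k then (nz.length:Int)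
            else 9223372036854775807)) := by
          rw [if_neg hmem]; omega
        rw [if_pos h0, if_pos hcond]
        rw [hftk, if_pos hmem', Prod.mk.injEq]
        refine ⟨?_, by rw [hnzlen]⟩
        rw [hnzlen, Nat.sub_self, Nat.add_sub_cancel_left]
        rw [hall, hdrop, h0]
        simp
    · -- non-zero element
      have hftk : (nums.take (k+1)).filter (fun x => x != 0) = nz ++ [nums[k]] := by
        rw [htake, List.filter_append, ← hnz]
        simp [h0]
      have hmem' : ((0:Int) ∈ nums.take (k+1)) ↔ ((0:Int) ∈ nums.take k) := by
        rw [htake]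
        simp only [List.mem_append, List.mem_singleton]
        constructor
        · rintro (h | h)
          · exact h
          · exact absurd h.symm h0
        · exact Or.inl
      have hlft : (nz ++ [nums[k]]).length = nz.length + 1 := by
        simp
      by_cases hmem : (0:Int) ∈ nums.take k
      · -- the swap: items[zero_index] := items[k]; items[k] := 0; zero_index += 1
        have hmlt : nz.length < k := by
          rcases Nat.lt_or_ge nz.length k with h | h
          · exact h
          · exfalso
            have hle : nz.length = k := le_antisymm hm h
            have heq : nz = nums.take k := by
              apply List.Sublist.eq_of_length List.filter_sublist
              rw [hle, List.length_take, Nat.min_eq_left hk'.le]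
            have h2 := (List.mem_filter.mp (heq ▸ hmem)).2
            simp at h2
        have hcond : ((k:Int) > (if (0:Int) ∈ nums.take k then (nz.length:Int)
            else 9223372036854775807)) := by
          rw [if_pos hmem]; exact_mod_cast hmlt
        rw [if_neg h0, if_pos hcond, if_pos hmem]
        rw [hftk, if_pos (hmem'.mpr hmem), Prod.mk.injEq]
        refine ⟨?_, by rw [hlft]; push_cast; ring⟩
        obtain ⟨j, hj⟩ : ∃ j, k - nz.length = j + 1 := ⟨k - nz.length - 1, by omega⟩
        have hrep : List.replicate (k - nz.length) (0:Int) =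
            0 :: List.replicate j 0 := by
          rw [hj, List.replicate_succ]
        have hrep' : List.replicate (k - nz.length) (0:Int) =
            List.replicate j 0 ++ [0] := by
          rw [hj, List.replicate_succ']
        rw [Int.toNat_natCast, Int.toNat_natCast]
        rw [List.append_assoc, List.set_append, if_neg (by omega), Nat.sub_self]
        rw [hrep, hdrop, List.cons_append]
        simp only [List.set_cons_zero]
        rw [List.set_append, if_neg (by omega), hj, List.set_cons_succ]
        rw [List.set_append, if_neg (by simp), List.length_replicate, Nat.sub_self]
        simp only [List.set_cons_zero]
        rw [hlft]
        have hcnt : k + 1 - (nz.length + 1) = k - nz.length := by omega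
        rw [hcnt, hrep']
        simp [List.append_assoc]
      · -- no zero yet: the element keeps its place
        have hall : nz = nums.take k := by
          rw [hnz, List.filter_eq_self]
          intro a ha
          simp only [bne_iff_ne, ne_eq]
          intro h; exact hmem (h ▸ ha)
        have hnzlen : nz.length = k := by rw [hall, List.length_take]; omega
        have hklt : (k:Int) < 9223372036854775807 := by
          have : (k:Int) ≤ (nums.length:Int) := by exact_mod_cast hk'.le
          omega
        have hcond : ¬ ((k:Int) > (if (0:Int) ∈ nums.take k then (nz.length:Int)
            else 9223372036854775807)) := by
          rw [if_neg hmem]; omega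
        rw [if_neg h0, if_neg hcond]
        rw [hftk, if_neg hmem, if_neg (fun h => hmem (hmem'.mp h)), Prod.mk.injEq]
        refine ⟨?_, rfl⟩
        rw [hlft, hnzlen]
        simp only [Nat.sub_self, List.replicate_zero, List.append_nil]
        rw [hdrop, List.append_assoc, List.singleton_append]

-- ===== VERDICT (by name: the statement is the Claim_ definition above) =====
theorem shift_array_spec : Claim_equal_shift_array := by
  intro items hdom hpre
  obtain ⟨-, hlen⟩ := hpre
  simp only [Spec_shift_array, shift_array, shift_array_alt]
  have hlen' : ((((PySem.Str.split₀ items).map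
      (fun t => (PySem.Int.ofStr? t).getD 0)).length : Nat) : Int) < 9223372036854775807 := by
    rw [List.length_map]; exact hlen
  rw [shiftA_inv _ hlen' _ le_rfl]
  simp only [List.take_length, List.drop_length, List.append_nil]
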